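-- pv_equiv track=rewrite | github.com/Jaaccob/Academic | III semestr/Algorytmy i struktóra danych/Labolatoria/Zestaw 1/fifth.py | sumaIloczynow
-- ===== SOURCE A (Python) =====
-- def sumaIloczynow(tableA):
--     sum = 0
--     for i in range(0, len(tableA)):
--         quotient = 1
--         for j in range(0, len(tableA)):
--             quotient *= tableA[j]
--         sum += quotient
--     return sum
-- ===== SOURCE B (Python) =====
-- def sumaIloczynow(tableA):
--     product = 1
--     for x in tableA:
--         product *= x
--     return len(tableA) * product
-- ===== Notes on version B (the rewrite author's own statement) =====
-- stated objective: faster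
-- what changed: Instead of recomputing the full product in an inner loop for each of the n outer iterations, B computes the product once in a single pass and multiplies it by len(tableA).
import Mathlib
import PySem

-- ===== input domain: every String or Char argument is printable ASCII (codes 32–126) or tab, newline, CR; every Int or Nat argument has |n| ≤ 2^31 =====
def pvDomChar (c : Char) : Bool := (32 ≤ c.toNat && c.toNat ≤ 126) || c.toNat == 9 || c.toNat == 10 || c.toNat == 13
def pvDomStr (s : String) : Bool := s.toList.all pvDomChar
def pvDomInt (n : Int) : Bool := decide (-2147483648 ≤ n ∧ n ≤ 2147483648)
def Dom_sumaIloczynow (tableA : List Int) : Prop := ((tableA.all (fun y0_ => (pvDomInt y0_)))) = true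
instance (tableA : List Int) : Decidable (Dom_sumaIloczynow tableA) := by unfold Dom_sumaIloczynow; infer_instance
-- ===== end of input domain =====

-- ===== PORT A =====
-- B computes the product once and multiplies by the length (O(n)); A recomputes it n times (O(n^2)).
def sumaIloczynow (tableA : List Int) : Int :=
  (PySem.List.pyRange 0 (PySem.List.len tableA) 1).foldl
    (fun sum _i =>
      sum + (PySem.List.pyRange 0 (PySem.List.len tableA) 1).foldl
        (fun quotient j => quotient * PySem.List.pyGetD tableA j 0) 1)
    0

-- ===== PORT B =====
def sumaIloczynow_alt (tableA : List Int) : Int :=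
  (PySem.List.len tableA) * tableA.foldl (fun product x => product * x) 1

-- ===== PRECONDITION & SPEC =====
def Spec_sumaIloczynow (tableA : List Int) (out : Int) : Prop := out = sumaIloczynow_alt tableA
instance (tableA : List Int) (out : Int) : Decidable (Spec_sumaIloczynow tableA out) := by unfold Spec_sumaIloczynow; infer_instance

-- ===== CLAIM (what is proved, stated in full; the proofs are below) =====
def Claim_equal_sumaIloczynow : Prop := ∀ (tableA : List Int), Dom_sumaIloczynow tableA → Spec_sumaIloczynow tableA (sumaIloczynow tableA)

-- ===== LEMMAS AND PROOFS =====

-- ===== VERDICT (by name: the statement is the Claim_ definition above) =====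
-- a loop that adds the constant c on each of its iterations adds length * c in total
theorem foldl_add_const (c : Int) (l : List Int) (s : Int) :
    l.foldl (fun acc _ => acc + c) s = s + l.length * c := by
  induction l generalizing s with
  | nil => simp
  | cons h t ih => simp [List.foldl, ih]; ring

-- ===== VERDICT (by name: the statement is the Claim_ definition above) =====
theorem sumaIloczynow_spec : Claim_equal_sumaIloczynow := by
  intro tableA _
  unfold Spec_sumaIloczynow sumaIloczynow sumaIloczynow_alt
  rw [PySem.List.foldl_pyRange_zero_pyGetD tableA 0 (fun quotient x => quotient * x) 1]
  rw [foldl_add_const]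
  simp [PySem.List.len, PySem.List.length_pyRange_one]
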